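-- pv_equiv track=rewrite | github.com/TurkuNLP/finngen-tools | stt-tools/convert_stt.py | join_split_headings
-- ===== SOURCE A (Python) =====
-- def has_sentence_ending_punctuation(string):
--     return string and string.rstrip()[-1] in '.:!?'
--
-- def potential_partial_heading_start(string):
--     return (
--         string and
--         (string[0].isupper() or string[0].isdigit()) and
--         len(string) < 50 and
--         not has_sentence_ending_punctuation(string)
--     )
--
-- def likely_partial_heading_end(string):
--     return (
--         string and
--         string[0].islower() and
--         len(string) < 50 and
--         not has_sentence_ending_punctuation(string)
--     )
--
-- def join_split_headings(paragraphs):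
--     # Headings are split across paragraphs in some documents; rejoin
--     # heuristically. (Mostly happens in pre-2000 papers.)
--     i = 1
--     while i < len(paragraphs):
--         if (likely_partial_heading_end(paragraphs[i]) and
--             potential_partial_heading_start(paragraphs[i-1])):
--             paragraphs[i-1] = paragraphs[i-1] + ' ' + paragraphs[i]
--             paragraphs = paragraphs[:i] + paragraphs[i+1:]
--         else:
--             i += 1
--     return paragraphs
-- ===== SOURCE B (Python) =====
-- def has_sentence_ending_punctuation(string):
--     return string and string.rstrip()[-1] in '.:!?'
--
-- def potential_partial_heading_start(string):
--     return (
--         string and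
--         (string[0].isupper() or string[0].isdigit()) and
--         len(string) < 50 and
--         not has_sentence_ending_punctuation(string)
--     )
--
-- def likely_partial_heading_end(string):
--     return (
--         string and
--         string[0].islower() and
--         len(string) < 50 and
--         not has_sentence_ending_punctuation(string)
--     )
--
-- def join_split_headings(paragraphs):
--     # Single pass: either merge the paragraph into the last kept one or keep it.
--     result = []
--     for p in paragraphs:
--         if (result and likely_partial_heading_end(p) and
--                 potential_partial_heading_start(result[-1])):
--             result[-1] = result[-1] + ' ' + p
--         else:
--             result.append(p)
--     return result
-- ===== Notes on version B (the rewrite author's own statement) =====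
-- stated objective: alternative
-- what changed: Replaces the delete-by-slicing while-loop over a shifting index with a single forward pass that appends each paragraph to a result list or merges it into the result's last element; not measured as faster on the generated inputs (the merge path is rare on random data).
import Mathlib
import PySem

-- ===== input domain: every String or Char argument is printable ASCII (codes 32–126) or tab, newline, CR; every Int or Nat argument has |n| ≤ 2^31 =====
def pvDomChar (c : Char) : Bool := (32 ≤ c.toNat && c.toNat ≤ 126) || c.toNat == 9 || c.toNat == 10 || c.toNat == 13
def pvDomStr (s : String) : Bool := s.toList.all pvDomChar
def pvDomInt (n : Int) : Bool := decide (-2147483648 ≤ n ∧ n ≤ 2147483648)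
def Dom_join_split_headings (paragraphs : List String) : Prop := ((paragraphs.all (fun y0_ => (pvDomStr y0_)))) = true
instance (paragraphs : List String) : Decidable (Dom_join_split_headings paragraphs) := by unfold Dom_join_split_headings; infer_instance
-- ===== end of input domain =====

-- B replaces A's slice-and-reindex while-loop by one forward pass merging into the last
-- element of a result list (same return value; A also mutates its argument list, B does not).

-- ===== PORT A =====
-- shared module helpers (used verbatim by both Pythons)
-- `string and string.rstrip()[-1] in '.:!?'`; the [-1] index is in range whenever the
-- callers reach it (the argument's first char is a letter or digit, which rstrip keeps),
-- so returning false on the unreachable none case is exact.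
def hasSEP (s : String) : Bool :=
  !(s == "") &&
    (match PySem.Str.pyGet? (PySem.Str.rstrip s) (-1) with
     | some c => ['.', ':', '!', '?'].contains c
     | none => false)

def potentialStart (s : String) : Bool :=
  match PySem.Str.pyGet? s 0 with
  | some c => (PySem.Chars.isupper c || PySem.Chars.isdigit c) && (PySem.Str.len s < 50) && !hasSEP s
  | none => false

def likelyEnd (s : String) : Bool :=
  match PySem.Str.pyGet? s 0 with
  | some c => PySem.Chars.islower c && (PySem.Str.len s < 50) && !hasSEP s
  | none => false

-- needed by joinLoop's decreasing_by: the merge step shortens the list by one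
lemma joinLoop_step_len (xs : List String) (i : Nat) (h : i < xs.length) (v : String) :
    (PySem.List.slice (PySem.List.pySetD xs ((i : Int) - 1) v) none (some (i : Int)) ++
      PySem.List.slice (PySem.List.pySetD xs ((i : Int) - 1) v) (some ((i : Int) + 1)) none).length
      + 1 = xs.length := by
  rw [PySem.List.slice_to _ (by omega), PySem.List.slice_from _ (by omega)]
  have h1 : ((i : Int)).toNat = i := by omega
  have h2 : ((i : Int) + 1).toNat = i + 1 := by omega
  have h3 : (PySem.List.pySetD xs ((i : Int) - 1) v).length = xs.length :=
    PySem.List.length_pySetD xs ((i : Int) - 1) v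
  simp [h1, h2, h3]
  omega

-- the while-loop of A: state = (paragraphs, i)
def joinLoop (paragraphs : List String) (i : Nat) : List String :=
  if h : i < paragraphs.length then
    if likelyEnd (PySem.List.pyGetD paragraphs (i : Int) "") &&
        potentialStart (PySem.List.pyGetD paragraphs ((i : Int) - 1) "") then
      let merged := PySem.List.pyGetD paragraphs ((i : Int) - 1) "" ++ " " ++
        PySem.List.pyGetD paragraphs (i : Int) ""
      let updated := PySem.List.pySetD paragraphs ((i : Int) - 1) merged
      joinLoop (PySem.List.slice updated none (some (i : Int)) ++
        PySem.List.slice updated (some ((i : Int) + 1)) none) i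
    else
      joinLoop paragraphs (i + 1)
  else paragraphs
termination_by paragraphs.length - i
decreasing_by
  · have := joinLoop_step_len paragraphs i h
      (PySem.List.pyGetD paragraphs ((i : Int) - 1) "" ++ " " ++ PySem.List.pyGetD paragraphs (i : Int) "")
    omega
  · omega

def join_split_headings (paragraphs : List String) : List String :=
  joinLoop paragraphs 1

-- ===== PORT B =====
def altStep (result : List String) (p : String) : List String :=
  match result.getLast? with
  | some last =>
      if likelyEnd p && potentialStart last then result.dropLast ++ [last ++ " " ++ p]
      else result ++ [p]
  | none => result ++ [p]

def join_split_headings_alt (paragraphs : List String) : List String :=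
  paragraphs.foldl altStep []

-- ===== PRECONDITION & SPEC =====
def Spec_join_split_headings (paragraphs : List String) (out : List String) : Prop := out = join_split_headings_alt paragraphs
instance (paragraphs : List String) (out : List String) : Decidable (Spec_join_split_headings paragraphs out) := by unfold Spec_join_split_headings; infer_instance

-- ===== CLAIM (what is proved, stated in full; the proofs are below) =====
def Claim_equal_join_split_headings : Prop := ∀ (paragraphs : List String), Dom_join_split_headings paragraphs → Spec_join_split_headings paragraphs (join_split_headings paragraphs)

-- ===== LEMMAS AND PROOFS =====
lemma slice_take_drop (xs : List String) (i : Nat) :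
    PySem.List.slice xs none (some (i : Int)) ++ PySem.List.slice xs (some ((i : Int) + 1)) none
      = xs.take i ++ xs.drop (i + 1) := by
  rw [PySem.List.slice_to _ (by omega), PySem.List.slice_from _ (by omega)]
  norm_num

lemma joinLoop_eq_foldl (rest pre : List String) (last : String) :
    joinLoop ((pre ++ [last]) ++ rest) (pre.length + 1) = List.foldl altStep (pre ++ [last]) rest := by
  induction rest generalizing pre last with
  | nil => unfold joinLoop; simp
  | cons r rest ih =>
    have hlt : pre.length + 1 < ((pre ++ [last]) ++ r :: rest).length := by simp
    have hcast : (((pre.length + 1 : Nat) : Int) - 1) = ((pre.length : Nat) : Int) := by push_cast; ring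
    have hget1 : PySem.List.pyGetD ((pre ++ [last]) ++ r :: rest) ((pre.length + 1 : Nat) : Int) "" = r := by
      rw [PySem.List.pyGetD_natCast]; simp [List.getD]
    have hget0 : PySem.List.pyGetD ((pre ++ [last]) ++ r :: rest) (((pre.length + 1 : Nat) : Int) - 1) "" = last := by
      rw [hcast, PySem.List.pyGetD_natCast]; simp [List.getD]
    unfold joinLoop
    rw [dif_pos hlt]
    by_cases hc : (likelyEnd r && potentialStart last) = true
    · rw [if_pos (by rw [hget1, hget0]; exact hc)]
      have hset : PySem.List.pySetD ((pre ++ [last]) ++ r :: rest) (((pre.length + 1 : Nat) : Int) - 1)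
          (PySem.List.pyGetD ((pre ++ [last]) ++ r :: rest) (((pre.length + 1 : Nat) : Int) - 1) "" ++ " " ++
           PySem.List.pyGetD ((pre ++ [last]) ++ r :: rest) ((pre.length + 1 : Nat) : Int) "")
          = (pre ++ [last ++ " " ++ r]) ++ r :: rest := by
        rw [hget0, hget1, hcast, PySem.List.pySetD_natCast]; simp
      simp only [hset]
      have htake : ((pre ++ [last ++ " " ++ r]) ++ r :: rest).take (pre.length + 1)
          = pre ++ [last ++ " " ++ r] := by
        have := List.take_left (l₁ := pre ++ [last ++ " " ++ r]) (l₂ := r :: rest)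
        simpa using this
      have hdrop : ((pre ++ [last ++ " " ++ r]) ++ r :: rest).drop (pre.length + 1 + 1)
          = rest := by
        rw [List.drop_append]
        simp
      rw [slice_take_drop, htake, hdrop, ih pre (last ++ " " ++ r)]
      simp [List.foldl_cons, altStep, hc]
    · rw [if_neg (by rw [hget1, hget0]; exact hc)]
      have hre : ((pre ++ [last]) ++ r :: rest) = (((pre ++ [last]) ++ [r]) ++ rest) := by simp
      have hlen : pre.length + 1 + 1 = ((pre ++ [last]).length + 1) := by simp
      rw [hre, hlen, ih (pre ++ [last]) r]
      simp [List.foldl_cons, altStep, hc]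


-- ===== VERDICT (by name: the statement is the Claim_ definition above) =====
theorem join_split_headings_spec : Claim_equal_join_split_headings := by
  intro paragraphs _
  unfold Spec_join_split_headings join_split_headings join_split_headings_alt
  cases paragraphs with
  | nil => simp [joinLoop]
  | cons p ps =>
      have := joinLoop_eq_foldl ps [] p
      simpa [altStep] using this
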